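-- pv_equiv track=rewrite | github.com/taraszag/GitHM_45_46 | note_functions.py | del_notes
-- ===== SOURCE A (Python) =====
-- def del_notes(data_base, name, del_note, password):
--     for s in range(len(data_base)):
--         if data_base[s][0] == name and data_base[s][1] == password:
--             for i in range(len(data_base)):
--                 for j in range(2, len(data_base[i])):
--                     if data_base[i][j] == del_note:
--                         del data_base[i][j]
--                         return data_base
-- ===== SOURCE B (Python) =====
-- def del_notes(data_base, name, del_note, password):
--     """Pure recursive rebuild: returns a NEW list with the first matching note
--     removed (A instead mutates the caller's list in place and returns it)."""
--
--     def drop_note(notes):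
--         # notes without its first element equal to del_note, or None if absent
--         if not notes:
--             return None
--         if notes[0] == del_note:
--             return notes[1:]
--         rest = drop_note(notes[1:])
--         return None if rest is None else [notes[0]] + rest
--
--     def rebuild(records):
--         # new record list with the first matching note removed, or None
--         if not records:
--             return None
--         head = records[0]
--         dropped = drop_note(head[2:])
--         if dropped is not None:
--             return [head[:2] + dropped] + records[1:]
--         tail = rebuild(records[1:])
--         return None if tail is None else [head] + tail
--
--     def authed(records):
--         if not records:
--             return False
--         return (records[0][0] == name and records[0][1] == password) or authed(records[1:])
--
--     return rebuild(data_base) if authed(data_base) else None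
-- ===== Notes on version B (the rewrite author's own statement) =====
-- stated objective: alternative
-- what changed: B is a pure structural recursion that rebuilds the database (recursively dropping the first matching note and consing untouched records back on) instead of A's index loops with an in-place del; authentication is a separate recursive predicate instead of A's outer loop that re-runs the whole nested note scan at every authenticating record.
-- crash fix: On databases with no matching note that contain a too-short record (empty, or only field equal to name), each such record preceded by an authenticating one, A raises IndexError while B returns None. — e.g. on del_notes([["u", "p"], []], "u", "x", "p"): A raises IndexError, B returns none
import Mathlib
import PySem

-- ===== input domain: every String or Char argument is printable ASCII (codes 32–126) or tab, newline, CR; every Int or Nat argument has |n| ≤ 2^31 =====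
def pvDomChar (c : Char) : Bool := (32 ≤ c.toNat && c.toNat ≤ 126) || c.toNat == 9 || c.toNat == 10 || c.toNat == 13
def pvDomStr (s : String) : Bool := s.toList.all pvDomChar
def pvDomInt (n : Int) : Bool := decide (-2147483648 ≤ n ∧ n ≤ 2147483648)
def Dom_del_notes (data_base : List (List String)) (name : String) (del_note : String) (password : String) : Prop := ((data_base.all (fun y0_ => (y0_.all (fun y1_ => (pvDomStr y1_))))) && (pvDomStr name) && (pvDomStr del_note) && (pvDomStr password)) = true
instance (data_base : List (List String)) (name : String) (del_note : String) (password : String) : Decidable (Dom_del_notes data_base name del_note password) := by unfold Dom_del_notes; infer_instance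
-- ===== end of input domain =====

-- B is a pure structural recursion rebuilding a NEW database (A mutates the caller's list in
-- place with `del` and returns it; the equivalence proved here is about the RETURN value only).

-- ===== PORT A =====
-- `del data_base[i][j]` on the returned value: remove index j from a row
def pvListDelAt (xs : List String) (j : Nat) : List String := xs.take j ++ xs.drop (j+1)

-- inner `for j in range(2, len(data_base[i]))` scan of A (started at j = 2)
def pvAFindJ (row : List String) (dn : String) (j : Nat) : Option Nat :=
  if h : j < row.length then
    if row[j] = dn then some j else pvAFindJ row dn (j+1)
  else none
termination_by row.length - j

-- A's `for i in range(len(data_base))` note scan with deletion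
def pvAInner (db : List (List String)) (dn : String) (i : Nat) : Option (List (List String)) :=
  if h : i < db.length then
    match pvAFindJ db[i] dn 2 with
    | some j => some (db.set i (pvListDelAt db[i] j))
    | none => pvAInner db dn (i+1)
  else none
termination_by db.length - i

-- A's outer `for s in range(len(data_base))` authentication loop
-- (element access via getD; Pre_del_notes excludes the inputs where Python raises IndexError)
def pvAOuter (db : List (List String)) (name : String) (dn : String) (pw : String) (s : Nat) :
    Option (List (List String)) :=
  if h : s < db.length then
    if (db[s].getD 0 "" = name ∧ db[s].getD 1 "" = pw) then
      match pvAInner db dn 0 with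
      | some r => some r
      | none => pvAOuter db name dn pw (s+1)
    else pvAOuter db name dn pw (s+1)
  else none
termination_by db.length - s

def del_notes (data_base : List (List String)) (name : String) (del_note : String) (password : String) : Option (List (List String)) :=
  pvAOuter data_base name del_note password 0

-- ===== PORT B =====
-- B's `drop_note`: the notes list without its first element equal to dn, or none if absent
def pvDropNote (dn : String) : List String → Option (List String)
  | [] => none
  | x :: rest =>
    if x = dn then some rest
    else match pvDropNote dn rest with
      | none => none
      | some r => some (x :: r)

-- B's `rebuild`: new record list with the first matching note removed, or none
def pvRebuild (dn : String) : List (List String) → Option (List (List String))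
  | [] => none
  | head :: tail =>
    match pvDropNote dn (head.drop 2) with
    | some dropped => some ((head.take 2 ++ dropped) :: tail)
    | none =>
      match pvRebuild dn tail with
      | none => none
      | some t => some (head :: t)

-- B's `authed` recursive predicate (rec[0]/rec[1] via getD; raising inputs excluded by Pre_)
def pvAuthed (name pw : String) : List (List String) → Bool
  | [] => false
  | r :: rest => (r.getD 0 "" == name && r.getD 1 "" == pw) || pvAuthed name pw rest

def del_notes_alt (data_base : List (List String)) (name : String) (del_note : String) (password : String) : Option (List (List String)) :=
  if pvAuthed name password data_base then pvRebuild del_note data_base else none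

-- ===== PRECONDITION & SPEC =====
-- `rec[0] == name and rec[1] == password` as A evaluates it (used by Pre_/Raises_ below)
def pvAuthRec (name : String) (pw : String) (r : List String) : Bool :=
  r.getD 0 "" == name && r.getD 1 "" == pw
-- a record on which Python's `data_base[s][0]` / `data_base[s][1]` raises IndexError
def pvBadRec (name : String) (r : List String) : Bool :=
  r.isEmpty || (r.length == 1 && r.headD "?" == name)
-- some record holds del_note at an index ≥ 2
def pvNoteEx (dn : String) (db : List (List String)) : Bool :=
  db.any (fun r => (r.drop 2).contains dn)

-- Pre_ excludes exactly the inputs where the Python A raises IndexError: a record that is empty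
-- (or whose only field equals name) which the outer scan reaches, i.e. one not preceded both by an
-- authenticating record and (globally) a matching note that would have made A return earlier.
def Pre_del_notes (data_base : List (List String)) (name : String) (del_note : String) (password : String) : Prop :=
  ∀ k, k < data_base.length → pvBadRec name (data_base.getD k []) = true →
    pvNoteEx del_note data_base = true ∧
      ∃ s, s < k ∧ pvAuthRec name password (data_base.getD s []) = true
instance (data_base : List (List String)) (name : String) (del_note : String) (password : String) : Decidable (Pre_del_notes data_base name del_note password) := by unfold Pre_del_notes; infer_instance

def pvWitness_del_notes : List (List String) × String × String × String :=
  ([["u", "p", "n"], ["v", "q"]], "u", "n", "p")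

-- A raises IndexError on databases that contain a too-short record but no matching note, every
-- too-short record being preceded by an authenticating one; B returns None there (no note to delete).
def Raises_del_notes (data_base : List (List String)) (name : String) (del_note : String) (password : String) : Prop :=
  pvNoteEx del_note data_base = false ∧
  (∃ k, k < data_base.length ∧ pvBadRec name (data_base.getD k []) = true) ∧
  (∀ k, k < data_base.length → pvBadRec name (data_base.getD k []) = true →
    ∃ s, s < k ∧ pvAuthRec name password (data_base.getD s []) = true)
instance (data_base : List (List String)) (name : String) (del_note : String) (password : String) : Decidable (Raises_del_notes data_base name del_note password) := by unfold Raises_del_notes; infer_instance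

def pvRaiseWitness_del_notes : List (List String) × String × String × String :=
  ([["u", "p"], []], "u", "x", "p")
def pvRaiseWitnessOut_del_notes : Option (List (List String)) := none

def Spec_del_notes (data_base : List (List String)) (name : String) (del_note : String) (password : String) (out : Option (List (List String))) : Prop := out = del_notes_alt data_base name del_note password
instance (data_base : List (List String)) (name : String) (del_note : String) (password : String) (out : Option (List (List String))) : Decidable (Spec_del_notes data_base name del_note password out) := by unfold Spec_del_notes; infer_instance

-- ===== CLAIM (what is proved, stated in full; the proofs are below) =====
def Claim_equal_del_notes : Prop := ∀ (data_base : List (List String)) (name : String) (del_note : String) (password : String), Dom_del_notes data_base name del_note password → Pre_del_notes data_base name del_note password → Spec_del_notes data_base name del_note password (del_notes data_base name del_note password)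

def Claim_raises_del_notes : Prop := (∀ (data_base : List (List String)) (name : String) (del_note : String) (password : String), Dom_del_notes data_base name del_note password → Raises_del_notes data_base name del_note password → ¬ Pre_del_notes data_base name del_note password) ∧ (Dom_del_notes (pvRaiseWitness_del_notes.1) (pvRaiseWitness_del_notes.2.1) (pvRaiseWitness_del_notes.2.2.1) (pvRaiseWitness_del_notes.2.2.2) ∧ Raises_del_notes (pvRaiseWitness_del_notes.1) (pvRaiseWitness_del_notes.2.1) (pvRaiseWitness_del_notes.2.2.1) (pvRaiseWitness_del_notes.2.2.2) ∧ del_notes_alt (pvRaiseWitness_del_notes.1) (pvRaiseWitness_del_notes.2.1) (pvRaiseWitness_del_notes.2.2.1) (pvRaiseWitness_del_notes.2.2.2) = pvRaiseWitnessOut_del_notes)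

-- ===== LEMMAS AND PROOFS =====

-- A's j-scan from index j is findIdx? on the suffix, shifted by j
theorem pvAFindJ_eq (row : List String) (dn : String) (j : Nat) :
    pvAFindJ row dn j = ((row.drop j).findIdx? (· == dn)).map (· + j) := by
  fun_induction pvAFindJ row dn j with
  | case1 j h hif =>
    rw [List.drop_eq_getElem_cons h]
    simp [List.findIdx?_cons, hif]
  | case2 j h hif ih =>
    rw [List.drop_eq_getElem_cons h]
    simp only [List.findIdx?_cons]
    have hb : (row[j] == dn) = false := by simpa using hif
    rw [hb, ih]
    cases hfi : (row.drop (j+1)).findIdx? (· == dn) <;> simp [Nat.add_assoc, Nat.add_comm 1 j]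
  | case3 j h =>
    rw [List.drop_eq_nil_iff.2 (by omega)]
    simp

-- B's drop_note removes the element at the first matching index
theorem pvDropNote_eq (dn : String) (L : List String) :
    pvDropNote dn L = (L.findIdx? (· == dn)).map (fun k => L.take k ++ L.drop (k+1)) := by
  induction L with
  | nil => simp [pvDropNote]
  | cons x rest ih =>
    by_cases hx : x = dn
    · simp [pvDropNote, hx, List.findIdx?_cons]
    · have hb : (x == dn) = false := by simpa using hx
      simp only [pvDropNote, hx, if_false, ih, List.findIdx?_cons, hb]
      cases hfi : rest.findIdx? (· == dn) <;> simp

-- A's note scan from row i rebuilds the suffix and re-attaches the untouched prefix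
theorem pvAInner_eq (db : List (List String)) (dn : String) (i : Nat) :
    pvAInner db dn i = (pvRebuild dn (db.drop i)).map (fun t => db.take i ++ t) := by
  fun_induction pvAInner db dn i with
  | case1 i h j hfind =>
    rw [List.drop_eq_getElem_cons h]
    unfold pvRebuild
    rw [pvAFindJ_eq] at hfind
    rw [pvDropNote_eq]
    cases hfi : (db[i].drop 2).findIdx? (· == dn) with
    | none => rw [hfi] at hfind; simp at hfind
    | some k =>
      rw [hfi] at hfind
      simp only [Option.map_some] at hfind
      obtain rfl : k + 2 = j := by simpa using hfind
      simp only [Option.map_some, Option.some.injEq]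
      rw [List.set_eq_take_append_cons_drop, if_pos h]
      congr 1
      -- row-level: pvListDelAt row (k+2) = row.take 2 ++ ((row.drop 2).take k ++ (row.drop 2).drop (k+1))
      unfold pvListDelAt
      rw [show k + 2 = 2 + k by omega, List.take_add, List.drop_drop]
      rw [show 2 + k + 1 = k + 1 + 2 by omega]
      simp [List.append_assoc]
      omega
  | case2 i h hfind ih =>
    rw [List.drop_eq_getElem_cons h]
    unfold pvRebuild
    rw [pvAFindJ_eq] at hfind
    rw [pvDropNote_eq]
    cases hfi : (db[i].drop 2).findIdx? (· == dn) with
    | some k => rw [hfi] at hfind; simp at hfind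
    | none =>
      rw [ih]
      cases hr : pvRebuild dn (db.drop (i+1)) with
      | none => simp
      | some t =>
        simp only [Option.map_some]
        rw [← List.take_concat_get h, List.concat_eq_append, List.append_assoc]
        simp
  | case3 i h =>
    rw [List.drop_eq_nil_iff.2 (by omega)]
    simp [pvRebuild]

-- A's outer loop from s: if some remaining record authenticates, the result is the note scan, else none
theorem pvAOuter_eq (db : List (List String)) (name dn pw : String) (s : Nat) :
    pvAOuter db name dn pw s =
      if (db.drop s).any (pvAuthRec name pw) then pvAInner db dn 0 else none := by
  fun_induction pvAOuter db name dn pw s with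
  | case1 s h hauth r hr =>
    rw [List.drop_eq_getElem_cons h]
    have hb : pvAuthRec name pw db[s] = true := by
      simp [pvAuthRec]; exact hauth
    simp only [List.any_cons, hb, Bool.true_or, if_true, hr]
  | case2 s h hauth hr ih =>
    rw [List.drop_eq_getElem_cons h]
    have hb : pvAuthRec name pw db[s] = true := by
      simp [pvAuthRec]; exact hauth
    rw [ih]
    simp only [List.any_cons, hb, Bool.true_or, if_true, hr]
    split <;> simp
  | case3 s h hauth ih =>
    rw [List.drop_eq_getElem_cons h]
    have hb : pvAuthRec name pw db[s] = false := by
      simp [pvAuthRec]; intro h1 h2; exact absurd ⟨h1, h2⟩ hauth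
    rw [ih]
    simp only [List.any_cons, hb, Bool.false_or]
  | case4 s h =>
    rw [List.drop_eq_nil_iff.2 (by omega)]
    simp

-- B's recursive `authed` is the same scan as List.any with A's per-record test
theorem pvAuthed_eq (name pw : String) (db : List (List String)) :
    pvAuthed name pw db = db.any (pvAuthRec name pw) := by
  induction db with
  | nil => simp [pvAuthed]
  | cons r rest ih => simp [pvAuthed, pvAuthRec, ih]

-- ===== VERDICT (by name: the statement is the Claim_ definition above) =====
theorem del_notes_spec : Claim_equal_del_notes := by
  intro db name dn pw _ _
  unfold Spec_del_notes del_notes del_notes_alt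
  rw [pvAOuter_eq, List.drop_zero, pvAInner_eq db dn 0, List.drop_zero, pvAuthed_eq]
  cases pvRebuild dn db <;> split <;> simp

theorem del_notes_raises : Claim_raises_del_notes := by
  unfold Claim_raises_del_notes
  constructor
  · intro db name dn pw _ hR hP
    obtain ⟨hno, ⟨k, hk, hbad⟩, _⟩ := hR
    have := (hP k hk hbad).1
    simp [hno] at this
  · decide

-- self-check: the raise witness really lies inside Raises_del_notes (read off the theorem above)
theorem pvRaiseWitness_del_notes_ok :
    Raises_del_notes (pvRaiseWitness_del_notes.1) (pvRaiseWitness_del_notes.2.1)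
      (pvRaiseWitness_del_notes.2.2.1) (pvRaiseWitness_del_notes.2.2.2) := by
  have h := del_notes_raises
  unfold Claim_raises_del_notes at h
  exact h.2.2.1
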